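-- pv_equiv track=rewrite | github.com/megumi-ben/work13-wd | REI/extract_topk_bigrams.py | extract_literals
-- ===== SOURCE A (Python) =====
-- from typing import List, Iterable
--
-- META_CHARS = set(".^$*+?{}()|")
--
-- def extract_literals(regex: str, min_len: int = 2) -> List[str]:
--     r"""
--     保守、可用的 regex literal 抽取器（启发式）：
--     - 处理转义 "\x" 作为字面字符（使用 raw docstring 避免 Python 源码层 \x 解析报错）
--     - 跳过字符类 [...]（里面不当作 literal 串）
--     - 遇到元字符就断开当前 literal
--     目标是 baseline 级别“足够像 REI”的统计口径。
--
--     注意：这是“字符串层”的保守抽取，不试图完整解析正则语义。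
--     """
--     literals: List[str] = []
--     buf: List[str] = []
--     i = 0
--     n = len(regex)
--     in_class = False
--
--     while i < n:
--         ch = regex[i]
--
--         # 进入字符类
--         if not in_class and ch == "[":
--             if buf:
--                 literals.append("".join(buf))
--                 buf = []
--             in_class = True
--             i += 1
--             continue
--
--         # 在字符类中：跳过内容
--         if in_class:
--             # 跳过转义
--             if ch == "\\" and i + 1 < n:
--                 i += 2
--                 continue
--             if ch == "]":
--                 in_class = False
--             i += 1
--             continue
--
--         # 转义字符 -> 作为字面字符（保持原启发式）
--         if ch == "\\":
--             if i + 1 < n: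
--                 nxt = regex[i + 1]
--                 buf.append(nxt)
--                 i += 2
--             else:
--                 # 末尾孤立反斜杠：保守处理为字面字符
--                 buf.append(ch)
--                 i += 1
--             continue
--
--         # 元字符 -> 断开
--         if ch in META_CHARS:
--             if buf:
--                 literals.append("".join(buf))
--                 buf = []
--             i += 1
--             continue
--
--         # 普通字符
--         buf.append(ch)
--         i += 1
--
--     if buf:
--         literals.append("".join(buf))
--
--     # bigram 至少需要长度 2 的 literal
--     min_len = max(2, min_len)
--     return [s for s in literals if len(s) >= min_len]
-- ===== SOURCE B (Python) =====
-- from typing import List, Optional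
--
-- META_CHARS = set(".^$*+?{}()|")
--
--
-- def _skip_class(s: str, i: int) -> int:
--     """Return the index just past the character class whose body starts at i."""
--     n = len(s)
--     while i < n:
--         if s[i] == "\\" and i + 1 < n:
--             i += 2
--         elif s[i] == "]":
--             return i + 1
--         else:
--             i += 1
--     return n
--
--
-- def _tokenize(regex: str) -> List[Optional[str]]:
--     """A stream of tokens: a literal character, or None for a break
--     (a metacharacter or a whole character class)."""
--     tokens: List[Optional[str]] = []
--     i = 0
--     n = len(regex)
--     while i < n:
--         ch = regex[i]
--         if ch == "[":
--             tokens.append(None)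
--             i = _skip_class(regex, i + 1)
--         elif ch == "\\":
--             if i + 1 < n:
--                 tokens.append(regex[i + 1])
--                 i += 2
--             else:
--                 tokens.append("\\")
--                 i += 1
--         elif ch in META_CHARS:
--             tokens.append(None)
--             i += 1
--         else:
--             tokens.append(ch)
--             i += 1
--     return tokens
--
--
-- def extract_literals(regex: str, min_len: int = 2) -> List[str]:
--     pieces: List[str] = []
--     buf: List[str] = []
--     for t in _tokenize(regex):
--         if t is None:
--             if buf:
--                 pieces.append("".join(buf))
--                 buf = []
--         else:
--             buf.append(t)
--     if buf:
--         pieces.append("".join(buf))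
--     ml = max(2, min_len)
--     return [p for p in pieces if len(p) >= ml]
-- ===== Notes on version B (the rewrite author's own statement) =====
-- stated objective: simpler
-- what changed: A's single fused scanning loop with a manual index and an in_class flag is split into a two-phase pipeline: a tokenizer (with a separate character-class-skipping helper) that emits literal-char or break tokens, followed by a grouping pass over the token stream.
import Mathlib
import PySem

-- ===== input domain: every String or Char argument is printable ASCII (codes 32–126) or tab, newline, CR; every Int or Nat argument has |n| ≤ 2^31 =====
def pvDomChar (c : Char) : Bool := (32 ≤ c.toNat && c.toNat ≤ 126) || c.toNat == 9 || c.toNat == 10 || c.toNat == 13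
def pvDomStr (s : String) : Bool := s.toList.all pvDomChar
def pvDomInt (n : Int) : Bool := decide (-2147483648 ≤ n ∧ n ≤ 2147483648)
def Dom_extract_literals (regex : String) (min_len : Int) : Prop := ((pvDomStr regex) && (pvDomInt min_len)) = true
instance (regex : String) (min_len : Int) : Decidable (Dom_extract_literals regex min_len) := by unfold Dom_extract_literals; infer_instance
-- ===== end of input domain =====

-- B replaces A's fused index/in_class scanning loop by a two-phase pipeline (tokenize
-- into literal-char/break tokens with a separate class-skipping helper, then group);
-- objective: simpler decomposition, same cost. Return-value equivalence only (no mutation).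

def pvMetaChars : List Char := ['.', '^', '$', '*', '+', '?', '{', '}', '(', ')', '|']

-- ===== PORT A =====
-- A's while loop, transliterated: state = (remaining input, in_class, buf, literals);
-- `i += 2` becomes consuming two list cells.
def pvLoopA : List Char → Bool → List Char → List String → List String
  | [], _, buf, lits => if buf.isEmpty then lits else lits ++ [String.ofList buf]
  | c :: rest, in_class, buf, lits =>
    if ¬ in_class ∧ c = '[' then
      pvLoopA rest true [] (if buf.isEmpty then lits else lits ++ [String.ofList buf])
    else if in_class then
      if c = '\\' ∧ ¬ rest.isEmpty then pvLoopA rest.tail true buf lits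
      else if c = ']' then pvLoopA rest false buf lits
      else pvLoopA rest true buf lits
    else if c = '\\' then
      match rest with
      | d :: rest' => pvLoopA rest' false (buf ++ [d]) lits
      | [] => pvLoopA [] false (buf ++ [c]) lits
    else if pvMetaChars.contains c then
      pvLoopA rest false [] (if buf.isEmpty then lits else lits ++ [String.ofList buf])
    else pvLoopA rest false (buf ++ [c]) lits
  termination_by cs _ _ _ => cs.length
  decreasing_by all_goals simp [List.length_tail]

def extract_literals (regex : String) (min_len : Int) : List String :=
  let lits := pvLoopA regex.toList false [] []
  let ml := max 2 min_len
  lits.filter (fun s => PySem.Str.len s ≥ ml)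

-- ===== PORT B =====
-- _skip_class: drop a character class body, return the remaining input
def pvSkipClass : List Char → List Char
  | [] => []
  | '\\' :: _ :: rest => pvSkipClass rest
  | ']' :: rest => rest
  | _ :: rest => pvSkipClass rest

theorem pvSkipClass_len_le : ∀ l : List Char, (pvSkipClass l).length ≤ l.length := by
  intro l
  induction l using pvSkipClass.induct <;> simp [pvSkipClass] <;> omega

-- _tokenize: some c = literal char token, none = break token
def pvTokenize : List Char → List (Option Char)
  | [] => []
  | '[' :: rest => none :: pvTokenize (pvSkipClass rest)
  | '\\' :: d :: rest => some d :: pvTokenize rest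
  | '\\' :: [] => [some '\\']
  | c :: rest => (if pvMetaChars.contains c then none else some c) :: pvTokenize rest
  termination_by cs => cs.length
  decreasing_by
    all_goals simp
    have := pvSkipClass_len_le rest; omega

-- B's grouping for-loop over the token stream
def pvGroupB : List (Option Char) → List Char → List String → List String
  | [], buf, pieces => if buf.isEmpty then pieces else pieces ++ [String.ofList buf]
  | none :: ts, buf, pieces =>
      pvGroupB ts [] (if buf.isEmpty then pieces else pieces ++ [String.ofList buf])
  | some c :: ts, buf, pieces => pvGroupB ts (buf ++ [c]) pieces

def extract_literals_alt (regex : String) (min_len : Int) : List String :=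
  let pieces := pvGroupB (pvTokenize regex.toList) [] []
  let ml := max 2 min_len
  pieces.filter (fun s => PySem.Str.len s ≥ ml)

-- ===== PRECONDITION & SPEC =====
def Spec_extract_literals (regex : String) (min_len : Int) (out : List String) : Prop := out = extract_literals_alt regex min_len
instance (regex : String) (min_len : Int) (out : List String) : Decidable (Spec_extract_literals regex min_len out) := by unfold Spec_extract_literals; infer_instance

-- ===== CLAIM (what is proved, stated in full; the proofs are below) =====
def Claim_equal_extract_literals : Prop := ∀ (regex : String) (min_len : Int), Dom_extract_literals regex min_len → Spec_extract_literals regex min_len (extract_literals regex min_len)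

-- ===== LEMMAS AND PROOFS =====

theorem pvLoopA_nil (ic : Bool) (buf : List Char) (lits : List String) :
    pvLoopA [] ic buf lits = if buf.isEmpty then lits else lits ++ [String.ofList buf] := by
  rw [pvLoopA.eq_def]

-- inside a class, A's loop does exactly what pvSkipClass does before resuming
theorem pvLoopA_class (l : List Char) : ∀ buf lits,
    pvLoopA l true buf lits = pvLoopA (pvSkipClass l) false buf lits := by
  induction l using pvSkipClass.induct with
  | case1 => intro buf lits; simp [pvSkipClass, pvLoopA_nil]
  | case2 d rest ih =>
      intro buf lits
      rw [pvLoopA.eq_def]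
      simp [pvSkipClass, ih]
  | case3 rest =>
      intro buf lits
      rw [pvLoopA.eq_def]
      simp [pvSkipClass]
  | case4 c rest h1 h2 ih =>
      intro buf lits
      rw [pvLoopA.eq_def]
      rcases rest with _ | ⟨d, rest'⟩
      · by_cases hc : c = '\\'
        · subst hc; simp [pvSkipClass, ih]
        · simp [pvSkipClass, hc, ih]
      · have hc : ¬ c = '\\' := fun h => h1 d rest' h rfl
        simp [pvSkipClass, hc, ih]
        intro h; exact absurd h h2

-- the fused loop equals grouping the token stream
theorem pvLoopA_eq_group (l : List Char) : ∀ buf lits,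
    pvLoopA l false buf lits = pvGroupB (pvTokenize l) buf lits := by
  induction l using pvTokenize.induct with
  | case1 => intro buf lits; simp [pvTokenize, pvGroupB, pvLoopA_nil]
  | case2 rest ih =>
      intro buf lits
      rw [pvLoopA.eq_def]
      simp [pvTokenize, pvGroupB, pvLoopA_class, ih]
  | case3 d rest ih =>
      intro buf lits
      rw [pvLoopA.eq_def]
      simp [pvTokenize, pvGroupB, ih]
  | case4 =>
      intro buf lits
      rw [pvLoopA.eq_def]
      simp [pvTokenize, pvGroupB, pvLoopA_nil]
  | case5 c rest h1 h2 h3 ih =>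
      intro buf lits
      rw [pvLoopA.eq_def]
      have hb : ¬ c = '[' := h1
      have hs : ¬ c = '\\' := by
        intro h
        rcases rest with _ | ⟨d, r⟩
        · exact h3 h rfl
        · exact h2 d r h rfl
      by_cases hm : c ∈ pvMetaChars
      · simp [pvTokenize, pvGroupB, hb, hs, hm, ih]
      · simp [pvTokenize, pvGroupB, hb, hs, hm, ih]

-- ===== VERDICT (by name: the statement is the Claim_ definition above) =====
theorem extract_literals_spec : Claim_equal_extract_literals := by
  intro regex min_len _
  unfold Spec_extract_literals extract_literals extract_literals_alt
  simp [pvLoopA_eq_group]
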